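-- pv_equiv track=rewrite | github.com/joshuaraja1/financeiq | core/voice_tools.py | _match_goal
-- ===== SOURCE A (Python) =====
-- def _match_goal(goals: list[dict], needle: str) -> dict | None:
--     """Best-effort fuzzy goal lookup. Voice transcripts are noisy, so we
--     accept partial matches like 'retirement' → 'My Retirement Plan'."""
--     if not needle:
--         return goals[0] if goals else None
--     needle = needle.lower().strip()
--     for g in goals:
--         if (g.get("goal_name") or "").lower() == needle:
--             return g
--     for g in goals:
--         if needle in (g.get("goal_name") or "").lower():
--             return g
--     for g in goals:
--         if needle in (g.get("goal_type") or "").lower():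
--             return g
--     return None
-- ===== SOURCE B (Python) =====
-- def _match_goal(goals: list[dict], needle: str) -> dict | None:
--     """Single-pass fuzzy goal lookup: scan goals once, returning the first
--     exact name match immediately, otherwise remembering the first partial
--     name match and first type match as lower-priority fallbacks."""
--     if not needle:
--         return goals[0] if goals else None
--     needle = needle.lower().strip()
--     name_hit = None
--     type_hit = None
--     for g in goals:
--         name = (g.get("goal_name") or "").lower()
--         if name == needle:
--             return g
--         if name_hit is None and needle in name:
--             name_hit = g
--         if type_hit is None and needle in (g.get("goal_type") or "").lower():
--             type_hit = g
--     return name_hit if name_hit is not None else type_hit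
-- ===== Notes on version B (the rewrite author's own statement) =====
-- stated objective: alternative
-- what changed: Replaced A's three sequential scans (exact name, name substring, type substring) by a single pass that returns an exact match immediately and records the first name-substring and first type-substring candidates as fallbacks.
import Mathlib
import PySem

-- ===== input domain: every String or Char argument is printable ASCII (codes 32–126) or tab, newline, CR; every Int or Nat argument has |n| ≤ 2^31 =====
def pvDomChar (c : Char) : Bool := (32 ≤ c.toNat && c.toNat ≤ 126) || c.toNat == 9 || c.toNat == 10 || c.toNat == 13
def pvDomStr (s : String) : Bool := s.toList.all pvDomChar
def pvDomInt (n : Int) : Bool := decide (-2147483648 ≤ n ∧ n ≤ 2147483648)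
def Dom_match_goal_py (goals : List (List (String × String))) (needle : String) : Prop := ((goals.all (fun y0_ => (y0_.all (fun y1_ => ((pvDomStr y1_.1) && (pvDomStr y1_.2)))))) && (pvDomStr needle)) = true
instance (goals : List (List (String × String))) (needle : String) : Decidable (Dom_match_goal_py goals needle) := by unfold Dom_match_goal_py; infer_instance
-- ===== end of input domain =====

-- B replaces A's three sequential scans with one pass that keeps first-hit
-- candidates per priority tier (objective: alternative/single-pass; same results).

-- ===== PORT A =====
-- (g.get("goal_name") or "").lower() ; values are strings so `or ""` only replaces a missing key (or "") by ""
def pvNameOf (g : List (String × String)) : String :=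
  PySem.Str.lower ((((PySem.Dict.mk g).get? "goal_name")).getD "")

def pvTypeOf (g : List (String × String)) : String :=
  PySem.Str.lower (((PySem.Dict.mk g).get? "goal_type").getD "")

def match_goal_py (goals : List (List (String × String))) (needle : String) : Option (List (String × String)) :=
  if needle = "" then
    match goals with
    | [] => none
    | g :: _ => some g
  else
    let nd := PySem.Str.strip (PySem.Str.lower needle)
    match goals.find? (fun g => pvNameOf g == nd) with
    | some g => some g
    | none =>
      match goals.find? (fun g => PySem.Str.isIn nd (pvNameOf g)) with
      | some g => some g
      | none =>
        match goals.find? (fun g => PySem.Str.isIn nd (pvTypeOf g)) with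
        | some g => some g
        | none => none

-- ===== PORT B =====
def pvAltLoop (nd : String) : List (List (String × String)) → Option (List (String × String)) → Option (List (String × String)) → Option (List (String × String))
  | [], nameHit, typeHit =>
    match nameHit with
    | some g => some g
    | none => typeHit
  | g :: rest, nameHit, typeHit =>
    let name := pvNameOf g
    if name == nd then some g
    else
      let nameHit' := if nameHit.isNone && PySem.Str.isIn nd name then some g else nameHit
      let typeHit' := if typeHit.isNone && PySem.Str.isIn nd (pvTypeOf g) then some g else typeHit
      pvAltLoop nd rest nameHit' typeHit'

def match_goal_py_alt (goals : List (List (String × String))) (needle : String) : Option (List (String × String)) :=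
  if needle = "" then
    match goals with
    | [] => none
    | g :: _ => some g
  else
    pvAltLoop (PySem.Str.strip (PySem.Str.lower needle)) goals none none

-- ===== PRECONDITION & SPEC =====
def Spec_match_goal_py (goals : List (List (String × String))) (needle : String) (out : Option (List (String × String))) : Prop := out = match_goal_py_alt goals needle
instance (goals : List (List (String × String))) (needle : String) (out : Option (List (String × String))) : Decidable (Spec_match_goal_py goals needle out) := by unfold Spec_match_goal_py; infer_instance

-- ===== CLAIM (what is proved, stated in full; the proofs are below) =====
def Claim_equal_match_goal_py : Prop := ∀ (goals : List (List (String × String))) (needle : String), Dom_match_goal_py goals needle → Spec_match_goal_py goals needle (match_goal_py goals needle)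

-- ===== LEMMAS AND PROOFS =====

/-- B's single pass equals A's three `find?` passes, for arbitrary accumulators. -/
lemma pvAltLoop_eq (nd : String) (goals : List (List (String × String)))
    (nh th : Option (List (String × String))) :
    pvAltLoop nd goals nh th =
      ((goals.find? (fun g => pvNameOf g == nd)).or
        ((nh.or (goals.find? (fun g => PySem.Str.isIn nd (pvNameOf g)))).or
          (th.or (goals.find? (fun g => PySem.Str.isIn nd (pvTypeOf g)))))) := by
  induction goals generalizing nh th with
  | nil => cases nh <;> cases th <;> simp [pvAltLoop, Option.or]
  | cons g rest ih =>
    by_cases he : (pvNameOf g == nd) = true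
    · simp [pvAltLoop, he, Option.or]
    · rw [show pvAltLoop nd (g :: rest) nh th =
          pvAltLoop nd rest
            (if nh.isNone && PySem.Str.isIn nd (pvNameOf g) then some g else nh)
            (if th.isNone && PySem.Str.isIn nd (pvTypeOf g) then some g else th) by
        simp [pvAltLoop, he]]
      rw [ih]
      cases nh <;> cases th <;>
        simp [List.find?_cons, he, Option.or] <;> split_ifs <;> simp_all [Option.or]

-- ===== VERDICT (by name: the statement is the Claim_ definition above) =====
theorem match_goal_py_spec : Claim_equal_match_goal_py := by
  intro goals needle _
  unfold Spec_match_goal_py match_goal_py match_goal_py_alt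
  by_cases h : needle = ""
  · simp [h]
  · simp only [h, if_false]
    rw [pvAltLoop_eq]
    cases hf : goals.find? (fun g => pvNameOf g == PySem.Str.strip (PySem.Str.lower needle)) <;>
      cases hn : goals.find? (fun g => PySem.Str.isIn (PySem.Str.strip (PySem.Str.lower needle)) (pvNameOf g)) <;>
        cases ht : goals.find? (fun g => PySem.Str.isIn (PySem.Str.strip (PySem.Str.lower needle)) (pvTypeOf g)) <;>
          simp [Option.or]
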